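-- pv_equiv track=rewrite | github.com/pjdrm/DocumentFilter | annotator_agreement.py | segeval_converter
-- ===== SOURCE A (Python) =====
-- def segeval_converter(annotation):
--     segeval_format = []
--     sent_count = 0
--     for sent in annotation:
--         if sent == 1:
--             segeval_format.append(sent_count+1)
--             sent_count = 0
--         else:
--             sent_count += 1
--     segeval_format.append(sent_count)
--     return segeval_format
-- ===== SOURCE B (Python) =====
-- def segeval_converter(annotation):
--     bounds = [-1] + [i for i, s in enumerate(annotation) if s == 1] + [len(annotation) - 1]
--     return [b - a for a, b in zip(bounds, bounds[1:])]
-- ===== Notes on version B (the rewrite author's own statement) =====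
-- stated objective: alternative
-- what changed: B builds the list of boundary positions once and returns consecutive differences of the bounds list (sentinel -1, then each boundary position, then len - 1) computed by a zip, instead of threading a running sentence counter through the flags.
import Mathlib
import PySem

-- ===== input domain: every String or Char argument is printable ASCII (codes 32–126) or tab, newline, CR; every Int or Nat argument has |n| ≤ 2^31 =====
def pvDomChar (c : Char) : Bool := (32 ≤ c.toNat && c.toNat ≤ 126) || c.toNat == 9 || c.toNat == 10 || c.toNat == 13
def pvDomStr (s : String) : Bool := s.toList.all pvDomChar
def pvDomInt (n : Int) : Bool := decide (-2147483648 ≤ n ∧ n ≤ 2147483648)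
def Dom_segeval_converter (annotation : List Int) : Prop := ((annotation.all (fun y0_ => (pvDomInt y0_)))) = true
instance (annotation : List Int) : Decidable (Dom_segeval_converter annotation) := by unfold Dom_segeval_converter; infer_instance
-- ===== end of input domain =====

-- B computes the segment lengths as consecutive differences of the boundary-position
-- list (sentinel -1, each boundary index, then len - 1) instead of threading a running counter (objective: alternative).

-- ===== PORT A =====
def segeval_converter (annotation : List Int) : List Int :=
  let st := annotation.foldl
    (fun (st : List Int × Int) sent =>
      if sent == 1 then (st.1 ++ [st.2 + 1], 0) else (st.1, st.2 + 1))
    ([], 0)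
  st.1 ++ [st.2]

-- ===== PORT B =====
def segeval_converter_alt (annotation : List Int) : List Int :=
  let bounds : List Int :=
    [(-1 : Int)]
      ++ ((PySem.List.enumerate annotation).filter (fun p => p.2 == 1)).map (fun p => p.1)
      ++ [(annotation.length : Int) - 1]
  (bounds.zip bounds.tail).map (fun p => p.2 - p.1)

-- ===== PRECONDITION & SPEC =====
def Spec_segeval_converter (annotation : List Int) (out : List Int) : Prop := out = segeval_converter_alt annotation
instance (annotation : List Int) (out : List Int) : Decidable (Spec_segeval_converter annotation out) := by unfold Spec_segeval_converter; infer_instance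

-- ===== CLAIM (what is proved, stated in full; the proofs are below) =====
def Claim_equal_segeval_converter : Prop := ∀ (annotation : List Int), Dom_segeval_converter annotation → Spec_segeval_converter annotation (segeval_converter annotation)

-- ===== LEMMAS AND PROOFS =====

-- common recursive characterisation: f xs c = segments of xs with c already-counted sentences
def pvSeg (xs : List Int) (c : Int) : List Int :=
  match xs with
  | [] => [c]
  | x :: xs => if x == 1 then (c + 1) :: pvSeg xs 0 else pvSeg xs (c + 1)

-- consecutive differences starting from a
def pvDiffs (a : Int) (bs : List Int) : List Int :=
  match bs with
  | [] => []
  | b :: bs => (b - a) :: pvDiffs b bs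

theorem pvA_fold (xs : List Int) (acc : List Int) (c : Int) :
    (xs.foldl (fun (st : List Int × Int) sent =>
        if sent == 1 then (st.1 ++ [st.2 + 1], 0) else (st.1, st.2 + 1)) (acc, c)).1
      ++ [(xs.foldl (fun (st : List Int × Int) sent =>
        if sent == 1 then (st.1 ++ [st.2 + 1], 0) else (st.1, st.2 + 1)) (acc, c)).2]
      = acc ++ pvSeg xs c := by
  induction xs generalizing acc c with
  | nil => simp [pvSeg]
  | cons x xs ih =>
    simp only [List.foldl_cons]
    by_cases h : x = 1
    · rw [if_pos (by simp [h]), ih, pvSeg, if_pos (by simp [h]), List.append_assoc,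
        List.singleton_append]
    · rw [if_neg (by simp [h]), ih, pvSeg, if_neg (by simp [h])]

theorem pvZip_diffs (a : Int) (bs : List Int) :
    (((a :: bs).zip bs).map (fun p : Int × Int => p.2 - p.1)) = pvDiffs a bs := by
  induction bs generalizing a with
  | nil => simp [pvDiffs]
  | cons b bs ih =>
    show ((a, b) :: (b :: bs).zip bs).map (fun p : Int × Int => p.2 - p.1) = _
    simp only [List.map_cons, ih, pvDiffs]

theorem pvDiffs_seg (xs : List Int) (c : Int) (k : Int) :
    pvDiffs (k - 1 - c)
        (((PySem.List.enumerate xs k).filter (fun p => p.2 == 1)).map (fun p => p.1)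
          ++ [k + (xs.length : Int) - 1])
      = pvSeg xs c := by
  induction xs generalizing c k with
  | nil => simp [PySem.List.enumerate_nil, pvDiffs, pvSeg]
  | cons x xs ih =>
    by_cases h : x = 1
    · have h2 := ih 0 (k + 1)
      rw [show k + 1 - 1 - 0 = k by ring,
          show k + 1 + (xs.length : Int) - 1 = k + ((xs.length : Int) + 1) - 1 by ring] at h2
      simp only [PySem.List.enumerate_cons, pvSeg, h, List.filter_cons, beq_self_eq_true,
        if_true, List.map_cons, List.cons_append, pvDiffs, List.length_cons, Nat.cast_add,
        Nat.cast_one, List.cons.injEq]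
      exact ⟨by ring, h2⟩
    · have h2 := ih (c + 1) (k + 1)
      rw [show k + 1 - 1 - (c + 1) = k - 1 - c by ring,
          show k + 1 + (xs.length : Int) - 1 = k + ((xs.length : Int) + 1) - 1 by ring] at h2
      simp only [PySem.List.enumerate_cons, pvSeg, h, List.filter_cons, beq_iff_eq,
        if_false, List.length_cons, Nat.cast_add, Nat.cast_one]
      exact h2

-- ===== VERDICT (by name: the statement is the Claim_ definition above) =====
theorem segeval_converter_spec : Claim_equal_segeval_converter := by
  intro annotation _
  unfold Spec_segeval_converter segeval_converter segeval_converter_alt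
  simp only []
  rw [pvA_fold annotation [] 0, List.nil_append]
  have hz := pvZip_diffs (-1)
      ((((PySem.List.enumerate annotation 0).filter (fun p => p.2 == 1)).map (fun p => p.1))
        ++ [(annotation.length : Int) - 1])
  have hd := pvDiffs_seg annotation 0 0
  simp only [show (0 : Int) - 1 - 0 = -1 by ring, show (0 : Int) + (annotation.length : Int) - 1 = (annotation.length : Int) - 1 by ring] at hd
  simp only [List.cons_append, List.tail_cons, List.nil_append] at hz ⊢
  rw [← hd, ← hz]
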